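-- pv_equiv track=rewrite | github.com/wholemealbaby/villageGenerator | Road.py | relative_movement
-- ===== SOURCE A (Python) =====
-- def relative_movement(bearing, coords, instructions):
--     x, y, z = coords[0], coords[1], coords[2]
--     for i in instructions:
--         direction = i[0]
--         length = i[1]
--         if direction == 'up':
--             y += length
--         elif direction == 'down':
--             y -= length
--         elif direction == 'left' or direction == 'right':
--             if direction == 'right':
--                 length *= -1
--             if bearing == 'north':
--                 x -= length
--             elif bearing == 'east':
--                 z -= length
--             elif bearing == 'south':
--                 x += length
--             elif bearing == 'west':
--                 z += length
--         elif direction == 'forward' or direction == 'back':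
--             if direction == 'back':
--                 length *= -1
--             if bearing == 'north':
--                 z -= length
--             elif bearing == 'east':
--                 x += length
--             elif bearing == 'south':
--                 z += length
--             elif bearing == 'west':
--                 x -= length
--     return x, y, z
-- ===== SOURCE B (Python) =====
-- def relative_movement(bearing, coords, instructions):
--     # Aggregate first: net movement along the three relative axes
--     # (updates commute, so the order of instructions does not matter).
--     up = sum(l for d, l in instructions if d == 'up')
--     down = sum(l for d, l in instructions if d == 'down')
--     left = sum(l for d, l in instructions if d == 'left')
--     right = sum(l for d, l in instructions if d == 'right')
--     forward = sum(l for d, l in instructions if d == 'forward')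
--     back = sum(l for d, l in instructions if d == 'back')
--     v = up - down          # vertical (bearing-independent)
--     h = left - right       # lateral, positive = left
--     f = forward - back     # longitudinal, positive = forward
--     x, y, z = coords
--     y += v
--     if bearing == 'north':
--         x -= h; z -= f
--     elif bearing == 'east':
--         z -= h; x += f
--     elif bearing == 'south':
--         x += h; z += f
--     elif bearing == 'west':
--         z += h; x -= f
--     return (x, y, z)
-- ===== Notes on version B (the rewrite author's own statement) =====
-- stated objective: alternative
-- what changed: Replaced A's per-instruction coordinate updates by an aggregate-then-apply scheme: B first sums the net signed length along each relative axis (vertical/lateral/longitudinal) over all instructions, then applies a single closed-form bearing rotation to the coords at the end; correct because all of A's updates are commuting additions.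
import Mathlib
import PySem

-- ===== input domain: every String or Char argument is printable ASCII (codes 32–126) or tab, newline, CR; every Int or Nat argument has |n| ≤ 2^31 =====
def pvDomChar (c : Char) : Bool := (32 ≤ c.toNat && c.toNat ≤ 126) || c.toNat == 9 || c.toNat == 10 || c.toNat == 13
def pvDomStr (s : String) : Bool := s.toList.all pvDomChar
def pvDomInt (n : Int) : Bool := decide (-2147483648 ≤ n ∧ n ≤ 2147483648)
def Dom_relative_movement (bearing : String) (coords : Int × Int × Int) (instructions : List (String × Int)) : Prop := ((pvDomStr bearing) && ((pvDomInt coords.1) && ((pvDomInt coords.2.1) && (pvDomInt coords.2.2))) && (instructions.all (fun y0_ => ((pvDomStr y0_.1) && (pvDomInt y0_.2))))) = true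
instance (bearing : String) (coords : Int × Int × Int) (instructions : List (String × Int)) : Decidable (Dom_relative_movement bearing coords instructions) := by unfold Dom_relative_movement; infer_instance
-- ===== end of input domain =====

-- B replaces A's per-instruction coordinate updates by aggregate-then-apply: it first sums the net
-- signed length along each relative axis, then applies one closed-form bearing rotation at the end
-- (objective: alternative; correct because A's updates are commuting additions).

-- ===== PORT A =====
-- one iteration of A's for-loop, the if/elif chain verbatim
def rmStepA (bearing : String) (s : Int × Int × Int) (i : String × Int) : Int × Int × Int :=
  let x := s.1; let y := s.2.1; let z := s.2.2
  let direction := i.1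
  let length := i.2
  if direction == "up" then (x, y + length, z)
  else if direction == "down" then (x, y - length, z)
  else if direction == "left" || direction == "right" then
    let length := if direction == "right" then length * (-1) else length
    if bearing == "north" then (x - length, y, z)
    else if bearing == "east" then (x, y, z - length)
    else if bearing == "south" then (x + length, y, z)
    else if bearing == "west" then (x, y, z + length)
    else (x, y, z)
  else if direction == "forward" || direction == "back" then
    let length := if direction == "back" then length * (-1) else length
    if bearing == "north" then (x, y, z - length)
    else if bearing == "east" then (x + length, y, z)
    else if bearing == "south" then (x, y, z + length)
    else if bearing == "west" then (x - length, y, z)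
    else (x, y, z)
  else (x, y, z)

def relative_movement (bearing : String) (coords : Int × Int × Int) (instructions : List (String × Int)) : Int × Int × Int :=
  instructions.foldl (rmStepA bearing) coords

-- ===== PORT B =====
-- sum(l for d, l in instructions if d == dir)
def rmSumFor (d : String) (instructions : List (String × Int)) : Int :=
  ((instructions.filter (fun i => i.1 == d)).map Prod.snd).sum

def relative_movement_alt (bearing : String) (coords : Int × Int × Int) (instructions : List (String × Int)) : Int × Int × Int :=
  let v := rmSumFor "up" instructions - rmSumFor "down" instructions
  let h := rmSumFor "left" instructions - rmSumFor "right" instructions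
  let f := rmSumFor "forward" instructions - rmSumFor "back" instructions
  let x := coords.1; let y := coords.2.1 + v; let z := coords.2.2
  if bearing == "north" then (x - h, y, z - f)
  else if bearing == "east" then (x + f, y, z - h)
  else if bearing == "south" then (x + h, y, z + f)
  else if bearing == "west" then (x - f, y, z + h)
  else (x, y, z)

-- ===== PRECONDITION & SPEC =====
def Spec_relative_movement (bearing : String) (coords : Int × Int × Int) (instructions : List (String × Int)) (out : Int × Int × Int) : Prop := out = relative_movement_alt bearing coords instructions
instance (bearing : String) (coords : Int × Int × Int) (instructions : List (String × Int)) (out : Int × Int × Int) : Decidable (Spec_relative_movement bearing coords instructions out) := by unfold Spec_relative_movement; infer_instance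

-- ===== CLAIM (what is proved, stated in full; the proofs are below) =====
def Claim_equal_relative_movement : Prop := ∀ (bearing : String) (coords : Int × Int × Int) (instructions : List (String × Int)), Dom_relative_movement bearing coords instructions → Spec_relative_movement bearing coords instructions (relative_movement bearing coords instructions)

-- ===== LEMMAS AND PROOFS =====
theorem rmSumFor_cons (d : String) (i : String × Int) (l : List (String × Int)) :
    rmSumFor d (i :: l) = (if i.1 == d then i.2 else 0) + rmSumFor d l := by
  by_cases h : i.1 == d <;> simp [rmSumFor, h]

set_option maxHeartbeats 2000000 in
theorem rm_eq (bearing : String) (instructions : List (String × Int)) (coords : Int × Int × Int) :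
    relative_movement bearing coords instructions = relative_movement_alt bearing coords instructions := by
  induction instructions generalizing coords with
  | nil =>
    simp only [relative_movement, relative_movement_alt, rmSumFor, List.foldl_nil,
      List.filter_nil, List.map_nil, List.sum_nil]
    split_ifs <;> simp
  | cons i l ih =>
    obtain ⟨d, len⟩ := i
    have hA : relative_movement bearing coords ((d, len) :: l)
        = relative_movement bearing (rmStepA bearing coords (d, len)) l := by
      simp [relative_movement]
    rw [hA, ih]
    simp only [relative_movement_alt, rmSumFor_cons, rmStepA]
    by_cases hu : d = "up" <;> by_cases hd : d = "down" <;>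
    by_cases hl : d = "left" <;> by_cases hr : d = "right" <;>
    by_cases hf : d = "forward" <;> by_cases hb : d = "back" <;>
    by_cases hn : bearing = "north" <;> by_cases he : bearing = "east" <;>
    by_cases hs : bearing = "south" <;> by_cases hw : bearing = "west" <;>
    simp_all [Prod.ext_iff] <;> omega

-- ===== VERDICT (by name: the statement is the Claim_ definition above) =====
theorem relative_movement_spec : Claim_equal_relative_movement := by
  intro bearing coords instructions _
  exact rm_eq bearing instructions coords
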